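-- pv_equiv track=rewrite | github.com/SquirtlesAlgorithmStudy/SquirtlesAlgorithmStudy-Hard | 현중/삼성기출2023하반기오전1번 고대 문명 유적 탐사.py | count_clear
-- ===== SOURCE A (Python) =====
-- def bfs(arr, visited, si, sj, clr):
--     q = []
--     sset = set()
--     #visited는 아래 있음
--     cnt =0
--
--     q.append((si,sj))
--     visited[si][sj] =1
--     sset.add((si,sj))
--     cnt +=1
--
--     while q:
--         ci, cj = q.pop(0)
--         #네방향, 범위내, 미방문, 조건: 같은 값이면
--         for di, dj in ((-1,0),(1,0),(0,-1),(0,1)):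
--             ni,nj = ci+di, cj+dj
--             if 0<=ni<5 and 0<=nj<5 and visited[ni][nj]==0 and arr[ci][cj] == arr[ni][nj]:
--                 q.append((ni,nj))
--                 visited[ni][nj] =1
--                 sset.add((ni,nj))
--                 cnt +=1
--
--     #유물이 3개 이상이면 cnt return, clr==1이면 0으로 clr
--     if cnt>=3:
--         if clr ==1:
--             for i,j in sset:
--                 arr[i][j] =0
--         return cnt
--     else: #3개 미만이면 clr하지 않음
--         return 0
--
-- def count_clear(arr, clr):
--     visited = [[0]*5 for _ in range(5)]
--     cnt =0
--     for i in range(5):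
--         for j in range(5):
--             tmp = bfs(arr, visited, i, j, clr) # 같은 값이 3개 이상인 경우
--             cnt +=tmp
--     return cnt
-- ===== SOURCE B (Python) =====
-- def count_clear(arr, clr):
--     # One flat scan with a global 'seen' set; each component is grown to a
--     # fixpoint by whole-set expansion instead of a FIFO queue / visited matrix.
--     # Mutates arr in place (clearing) exactly like the original.
--     seen = set()
--     total = 0
--     for i in range(5):
--         for j in range(5):
--             comp = {(i, j)}
--             while True:
--                 grown = set(comp)
--                 for (ci, cj) in comp:
--                     for (ni, nj) in ((ci - 1, cj), (ci + 1, cj), (ci, cj - 1), (ci, cj + 1)):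
--                         if 0 <= ni < 5 and 0 <= nj < 5 and (ni, nj) not in seen and arr[ni][nj] == arr[ci][cj]:
--                             grown.add((ni, nj))
--                 if len(grown) == len(comp):
--                     break
--                 comp = grown
--             seen |= comp
--             if len(comp) >= 3:
--                 total += len(comp)
--                 if clr == 1:
--                     for (a, b) in comp:
--                         arr[a][b] = 0
--     return total
-- ===== Notes on version B (the rewrite author's own statement) =====
-- stated objective: alternative
-- what changed: Replaces the helper bfs with FIFO queue, 5x5 visited matrix and per-call clearing by a single flat scan keeping one global 'seen' set and growing each component to a fixpoint by whole-set expansion (level-set saturation instead of queue BFS).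
import Mathlib
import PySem

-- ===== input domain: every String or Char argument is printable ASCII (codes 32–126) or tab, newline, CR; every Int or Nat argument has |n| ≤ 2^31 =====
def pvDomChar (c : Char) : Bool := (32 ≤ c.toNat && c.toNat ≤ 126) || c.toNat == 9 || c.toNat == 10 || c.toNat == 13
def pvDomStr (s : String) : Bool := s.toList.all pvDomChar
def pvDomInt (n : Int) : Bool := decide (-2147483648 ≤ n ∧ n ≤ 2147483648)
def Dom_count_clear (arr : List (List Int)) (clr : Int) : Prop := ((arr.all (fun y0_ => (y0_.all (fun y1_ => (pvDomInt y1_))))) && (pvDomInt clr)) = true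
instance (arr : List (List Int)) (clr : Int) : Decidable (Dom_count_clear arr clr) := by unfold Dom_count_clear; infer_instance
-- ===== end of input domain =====

-- B replaces the queue-BFS helper (shared visited matrix) by a flat scan with one global seen set
-- and whole-set fixpoint growth of each component; same return value (and, in Python, the same
-- in-place clearing of arr when clr == 1 — the theorems below are about the RETURN value only).

-- ===== PORT A =====
-- arr[i][j] (read) and arr[i][j] = v (write); A's code always guards the indices in range
def get2 (m : List (List Int)) (i j : Int) : Int :=
  PySem.List.pyGetD (PySem.List.pyGetD m i []) j 0
def set2 (m : List (List Int)) (i j v : Int) : List (List Int) :=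
  PySem.List.pySetD m i (PySem.List.pySetD (PySem.List.pyGetD m i []) j v)

-- the 'while q:' loop of bfs; fuel 26 is exact: the loop pops at most 1 + 25 times
-- (each append marks a previously unvisited cell of the 5×5 visited matrix)
def bfsLoop (arr : List (List Int)) :
    Nat → List (Int × Int) → List (List Int) → PySem.Set (Int × Int) → Int →
    List (List Int) × PySem.Set (Int × Int) × Int
  | 0, _, visited, sset, cnt => (visited, sset, cnt)
  | _ + 1, [], visited, sset, cnt => (visited, sset, cnt)
  | n + 1, (ci, cj) :: rest, visited, sset, cnt =>
    let st := [((-1 : Int), (0 : Int)), (1, 0), (0, -1), (0, 1)].foldl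
      (fun (st : List (Int × Int) × List (List Int) × PySem.Set (Int × Int) × Int) d =>
        let ni := ci + d.1
        let nj := cj + d.2
        if 0 ≤ ni ∧ ni < 5 ∧ 0 ≤ nj ∧ nj < 5 ∧ get2 st.2.1 ni nj = 0 ∧
            get2 arr ci cj = get2 arr ni nj then
          (st.1 ++ [(ni, nj)], set2 st.2.1 ni nj 1, PySem.Set.add st.2.2.1 (ni, nj), st.2.2.2 + 1)
        else st)
      (rest, visited, sset, cnt)
    bfsLoop arr n st.1 st.2.1 st.2.2.1 st.2.2.2

-- bfs(arr, visited, si, sj, clr): returns (arr', visited', returned value)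
def bfs (arr visited : List (List Int)) (si sj clr : Int) :
    List (List Int) × List (List Int) × Int :=
  let visited1 := set2 visited si sj 1
  let r := bfsLoop arr 26 [(si, sj)] visited1 (PySem.Set.add PySem.Set.empty (si, sj)) 1
  if 3 ≤ r.2.2 then
    if clr = 1 then
      (r.2.1.foldl (fun a (p : Int × Int) => set2 a p.1 p.2 0) arr, r.1, r.2.2)
    else (arr, r.1, r.2.2)
  else (arr, r.1, 0)

def count_clear (arr : List (List Int)) (clr : Int) : Int :=
  let visited := (List.range 5).map (fun _ => List.replicate 5 (0 : Int))
  let st := (PySem.List.pyRange 0 5 1).foldl (fun st i =>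
      (PySem.List.pyRange 0 5 1).foldl
        (fun (st : List (List Int) × List (List Int) × Int) j =>
          let r := bfs st.1 st.2.1 i j clr
          (r.1, r.2.1, st.2.2 + r.2.2))
        st)
    ((arr, visited, (0 : Int)) : List (List Int) × List (List Int) × Int)
  st.2.2

-- ===== PORT B =====
-- one pass of the 'while True' growth: grown = set(comp) plus every in-range, unseen,
-- equal-valued neighbour of a member of comp
def altGrow (arr : List (List Int)) (seen comp : PySem.Set (Int × Int)) : PySem.Set (Int × Int) :=
  comp.foldl (fun grown c =>
    [(c.1 - 1, c.2), (c.1 + 1, c.2), (c.1, c.2 - 1), (c.1, c.2 + 1)].foldl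
      (fun (grown : PySem.Set (Int × Int)) n =>
        if 0 ≤ n.1 ∧ n.1 < 5 ∧ 0 ≤ n.2 ∧ n.2 < 5 ∧ ¬ PySem.Set.contains seen n = true ∧
            get2 arr n.1 n.2 = get2 arr c.1 c.2 then
          PySem.Set.add grown n
        else grown)
      grown)
    (PySem.Set.ofList comp)

-- the 'while True' loop; fuel 25 is exact: comp starts at size 1, grows strictly inside 25
-- cells until the final equal-size check breaks
def altLoop (arr : List (List Int)) (seen : PySem.Set (Int × Int)) :
    Nat → PySem.Set (Int × Int) → PySem.Set (Int × Int)
  | 0, comp => comp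
  | n + 1, comp =>
    let grown := altGrow arr seen comp
    if PySem.Set.len grown = PySem.Set.len comp then comp else altLoop arr seen n grown

def count_clear_alt (arr : List (List Int)) (clr : Int) : Int :=
  let st := (PySem.List.pyRange 0 5 1).foldl (fun st i =>
      (PySem.List.pyRange 0 5 1).foldl
        (fun (st : List (List Int) × PySem.Set (Int × Int) × Int) j =>
          let comp := altLoop st.1 st.2.1 25 (PySem.Set.ofList [(i, j)])
          let seen' := PySem.Set.union st.2.1 comp
          if 3 ≤ PySem.Set.len comp then
            if clr = 1 then
              (comp.foldl (fun a (p : Int × Int) => set2 a p.1 p.2 0) st.1, seen',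
                st.2.2 + PySem.Set.len comp)
            else (st.1, seen', st.2.2 + PySem.Set.len comp)
          else (st.1, seen', st.2.2))
        st)
    ((arr, PySem.Set.empty, (0 : Int)) : List (List Int) × PySem.Set (Int × Int) × Int)
  st.2.2

-- ===== PRECONDITION & SPEC =====
-- A raises IndexError unless the grid offers at least 5 rows each of length ≥ 5 (only the
-- first five entries of the first five rows are ever read); nothing else is excluded.
def Pre_count_clear (arr : List (List Int)) (clr : Int) : Prop :=
  5 ≤ arr.length ∧ ∀ row ∈ arr.take 5, 5 ≤ row.length
instance (arr : List (List Int)) (clr : Int) : Decidable (Pre_count_clear arr clr) := by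
  unfold Pre_count_clear; infer_instance

def pvWitness_count_clear : List (List Int) × Int :=
  ([[1, 1, 1, 0, 0], [2, 3, 4, 5, 6], [7, 8, 9, 10, 11],
    [12, 13, 14, 15, 16], [17, 18, 19, 20, 21]], 1)

def Spec_count_clear (arr : List (List Int)) (clr : Int) (out : Int) : Prop :=
  out = count_clear_alt arr clr
instance (arr : List (List Int)) (clr : Int) (out : Int) :
    Decidable (Spec_count_clear arr clr out) := by unfold Spec_count_clear; infer_instance

-- ===== CLAIM =====
def Claim_equal_count_clear : Prop := ∀ (arr : List (List Int)) (clr : Int),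
  Dom_count_clear arr clr → Pre_count_clear arr clr →
    Spec_count_clear arr clr (count_clear arr clr)

-- ===== LEMMAS AND PROOFS =====

-- in-range cells of the 5×5 grid
def inR (p : Int × Int) : Prop := 0 ≤ p.1 ∧ p.1 < 5 ∧ 0 ≤ p.2 ∧ p.2 < 5

-- the grid shape both ports rely on: at least 5 rows, the first five of length ≥ 5
def ArrOK (a : List (List Int)) : Prop := 5 ≤ a.length ∧ ∀ r ∈ a.take 5, 5 ≤ r.length

-- one expansion edge: n is an in-range, unseen neighbour of c holding the same value
def EdgeP (arr : List (List Int)) (seen : List (Int × Int)) (c n : Int × Int) : Prop :=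
  n ∈ [(c.1 - 1, c.2), (c.1 + 1, c.2), (c.1, c.2 - 1), (c.1, c.2 + 1)] ∧ inR n ∧
    n ∉ seen ∧ get2 arr n.1 n.2 = get2 arr c.1 c.2

inductive ReachP (arr : List (List Int)) (seen : List (Int × Int)) (s : Int × Int) :
    (Int × Int) → Prop
  | refl : ReachP arr seen s s
  | step {c n : Int × Int} : ReachP arr seen s c → EdgeP arr seen c n → ReachP arr seen s n

def cellsU : List (Int × Int) :=
  [(0,0),(0,1),(0,2),(0,3),(0,4),(1,0),(1,1),(1,2),(1,3),(1,4),
   (2,0),(2,1),(2,2),(2,3),(2,4),(3,0),(3,1),(3,2),(3,3),(3,4),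
   (4,0),(4,1),(4,2),(4,3),(4,4)]

theorem pyGetD_nonneg {α : Type} [Inhabited α] (xs : List α) (i : Int) (h : 0 ≤ i) (d : α) :
    PySem.List.pyGetD xs i d = xs.getD i.toNat d := by
  have h2 : i = ((i.toNat : Nat) : Int) := by omega
  rw [h2, PySem.List.pyGetD_natCast]; simp; rw [max_eq_left h]

theorem getD_set_if {α : Type} (l : List α) (m : Nat) (b : α) (k : Nat) (d : α) :
    (l.set m b).getD k d = if k = m ∧ m < l.length then b else l.getD k d := by
  rcases Nat.lt_or_ge m l.length with h | h
  · by_cases hk : k = m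
    · subst hk; simp [List.getD_eq_getElem?_getD, h]
    · simp [List.getD_eq_getElem?_getD, List.getElem?_set_ne (by omega : m ≠ k), hk]
  · simp [List.set_eq_of_length_le h]
    intro h1 h2; omega

theorem row_mem_take (a : List (List Int)) (k : Nat) (h5 : k < 5) (h : k < a.length) :
    a.getD k [] ∈ a.take 5 := by
  rw [List.getD_eq_getElem a [] h, List.mem_take_iff_getElem]
  exact ⟨k, by omega, rfl⟩

theorem mem_cellsU_of_inR (p : Int × Int) (hp : inR p) : p ∈ cellsU := by
  obtain ⟨p1, p2⟩ := p
  obtain ⟨h1, h2, h3, h4⟩ := hp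
  have e1 : p1 = 0 ∨ p1 = 1 ∨ p1 = 2 ∨ p1 = 3 ∨ p1 = 4 := by omega
  have e2 : p2 = 0 ∨ p2 = 1 ∨ p2 = 2 ∨ p2 = 3 ∨ p2 = 4 := by omega
  rcases e1 with h|h|h|h|h <;> subst h <;> rcases e2 with h|h|h|h|h <;> subst h <;> decide

theorem length_le_25 (l : List (Int × Int)) (h1 : l.Nodup) (h2 : ∀ p ∈ l, inR p) :
    l.length ≤ 25 := by
  have h := (List.subperm_of_subset h1 (fun p hp => mem_cellsU_of_inR p (h2 p hp))).length_le
  simpa [cellsU] using h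

theorem reach_inR (arr : List (List Int)) (seen : List (Int × Int)) (s p : Int × Int)
    (hs : inR s) (h : ReachP arr seen s p) : inR p := by
  induction h with
  | refl => exact hs
  | step _ he _ => exact he.2.1

-- ---- matrix access lemmas ----
theorem get2_eq (a : List (List Int)) (p : Int × Int) (hp : inR p) :
    get2 a p.1 p.2 = (a.getD p.1.toNat []).getD p.2.toNat 0 := by
  unfold get2
  rw [pyGetD_nonneg a p.1 hp.1, pyGetD_nonneg _ p.2 hp.2.2.1]

theorem set2_eq (a : List (List Int)) (p : Int × Int) (v : Int) (hp : inR p) :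
    set2 a p.1 p.2 v = a.set p.1.toNat ((a.getD p.1.toNat []).set p.2.toNat v) := by
  unfold set2
  rw [PySem.List.pySetD_of_nonneg _ _ hp.1, PySem.List.pySetD_of_nonneg _ _ hp.2.2.1,
    pyGetD_nonneg a p.1 hp.1]

theorem arrOK_set2 (a : List (List Int)) (p : Int × Int) (v : Int) (hA : ArrOK a)
    (hp : inR p) : ArrOK (set2 a p.1 p.2 v) := by
  obtain ⟨hl, hr⟩ := hA
  have hp1 : p.1.toNat < a.length := by obtain ⟨h1,h2,h3,h4⟩ := hp; omega
  have hrow : 5 ≤ (a.getD p.1.toNat []).length :=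
    hr _ (row_mem_take a p.1.toNat (by obtain ⟨h1,h2,h3,h4⟩ := hp; omega) hp1)
  rw [set2_eq a p v hp]
  refine ⟨by simpa using hl, ?_⟩
  intro r hrm
  rw [List.mem_take_iff_getElem] at hrm
  obtain ⟨k, hk, hkr⟩ := hrm
  rw [List.getElem_set] at hkr
  by_cases hkm : p.1.toNat = k
  · rw [if_pos hkm] at hkr
    subst hkr; simpa using hrow
  · rw [if_neg hkm] at hkr
    subst hkr
    exact hr _ (by rw [List.mem_take_iff_getElem]; exact ⟨k, by simpa using hk, rfl⟩)

theorem get2_set2 (a : List (List Int)) (p q : Int × Int) (v : Int) (hA : ArrOK a)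
    (hp : inR p) (hq : inR q) :
    get2 (set2 a p.1 p.2 v) q.1 q.2 = if q = p then v else get2 a q.1 q.2 := by
  have hp1 : p.1.toNat < a.length := by
    obtain ⟨h1,h2,h3,h4⟩ := hp; have := hA.1; omega
  have hrow : 5 ≤ (a.getD p.1.toNat []).length :=
    hA.2 _ (row_mem_take a p.1.toNat (by obtain ⟨h1,h2,h3,h4⟩ := hp; omega) hp1)
  rw [get2_eq _ q hq, set2_eq a p v hp, get2_eq a q hq, getD_set_if]
  obtain ⟨p1, p2⟩ := p
  obtain ⟨q1, q2⟩ := q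
  obtain ⟨hb1, hb2, hb3, hb4⟩ := hp
  obtain ⟨hc1, hc2, hc3, hc4⟩ := hq
  simp only [Prod.mk.injEq] at *
  by_cases h1 : q1 = p1
  · subst h1
    rw [if_pos ⟨rfl, hp1⟩, getD_set_if]
    by_cases h2 : q2 = p2
    · subst h2
      rw [if_pos ⟨rfl, by omega⟩, if_pos ⟨rfl, rfl⟩]
    · rw [if_neg (by intro hcon; exact h2 (by omega)),
        if_neg (by intro hcon; exact h2 hcon.2)]
  · rw [if_neg (by intro hcon; exact h1 (by omega)),
      if_neg (by intro hcon; exact h1 hcon.1)]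

-- ---- the clearing pass: order irrelevant ----
theorem set2_zero_comm (a : List (List Int)) (p q : Int × Int) (hp : inR p) (hq : inR q) :
    set2 (set2 a p.1 p.2 0) q.1 q.2 0 = set2 (set2 a q.1 q.2 0) p.1 p.2 0 := by
  rw [set2_eq _ q 0 hq, set2_eq a p 0 hp, set2_eq _ p 0 hp, set2_eq a q 0 hq]
  by_cases h1 : q.1.toNat = p.1.toNat
  · rw [h1]
    rcases Nat.lt_or_ge p.1.toNat a.length with hlt | hge
    · rw [getD_set_if, if_pos ⟨rfl, hlt⟩, getD_set_if, if_pos ⟨rfl, by simpa using hlt⟩,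
        List.set_set, List.set_set]
      by_cases h2 : q.2.toNat = p.2.toNat
      · rw [h2]
      · rw [List.set_comm _ _ (Ne.symm h2)]
    · simp only [List.set_eq_of_length_le hge]
  · rw [getD_set_if, if_neg (by intro hcon; exact h1 hcon.1),
      getD_set_if, if_neg (by intro hcon; exact h1 (hcon.1.symm)), List.set_comm _ _ (Ne.symm h1)]

theorem clearF_perm (L1 L2 : List (Int × Int)) (hP : L1.Perm L2) (hin : ∀ p ∈ L1, inR p) :
    ∀ a : List (List Int),
      L1.foldl (fun a (p : Int × Int) => set2 a p.1 p.2 0) a =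
      L2.foldl (fun a (p : Int × Int) => set2 a p.1 p.2 0) a := by
  induction hP with
  | nil => intro a; rfl
  | cons x h ih =>
    intro a
    simp only [List.foldl_cons]
    exact ih (fun p hp => hin p (List.mem_cons_of_mem x hp)) _
  | swap x y l =>
    intro a
    simp only [List.foldl_cons]
    rw [set2_zero_comm a y x (hin y (by simp)) (hin x (by simp))]
  | trans h1 h2 ih1 ih2 =>
    intro a
    rw [ih1 hin a, ih2 (fun p hp => hin p (h1.mem_iff.mpr hp)) a]

theorem arrOK_clearF (L : List (Int × Int)) (hin : ∀ p ∈ L, inR p) :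
    ∀ a : List (List Int), ArrOK a →
      ArrOK (L.foldl (fun a (p : Int × Int) => set2 a p.1 p.2 0) a) := by
  induction L with
  | nil => intro a hA; exact hA
  | cons x L ih =>
    intro a hA
    simp only [List.foldl_cons]
    exact ih (fun p hp => hin p (List.mem_cons_of_mem x hp)) _
      (arrOK_set2 a x 0 hA (hin x (by simp)))

-- ---- A side: the visited matrix tracks a set ----
-- V marks exactly seen ∪ sset (on the 5×5 board), with 0/1 entries
def VRel (V : List (List Int)) (m : List (Int × Int)) : Prop :=
  ∀ p, inR p → ((get2 V p.1 p.2 = 1 ↔ p ∈ m) ∧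
    (get2 V p.1 p.2 = 0 ∨ get2 V p.1 p.2 = 1))

def InvA (arr : List (List Int)) (seen : List (Int × Int)) (s : Int × Int)
    (q : List (Int × Int)) (V : List (List Int)) (sset : List (Int × Int)) (cnt : Int) : Prop :=
  (∀ p ∈ q, p ∈ sset) ∧ sset.Nodup ∧ s ∈ sset ∧
  (∀ p ∈ sset, ReachP arr seen s p) ∧
  (∀ c ∈ sset, c ∉ q → ∀ n, EdgeP arr seen c n → n ∈ sset) ∧
  cnt = (sset.length : Int) ∧ ArrOK V ∧ VRel V (seen ++ sset)

-- the body of A's inner for-loop (definitionally the lambda in bfsLoop)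
def stepA1 (arr : List (List Int)) (c : Int × Int)
    (st : List (Int × Int) × List (List Int) × PySem.Set (Int × Int) × Int) (d : Int × Int) :
    List (Int × Int) × List (List Int) × PySem.Set (Int × Int) × Int :=
  let ni := c.1 + d.1
  let nj := c.2 + d.2
  if 0 ≤ ni ∧ ni < 5 ∧ 0 ≤ nj ∧ nj < 5 ∧ get2 st.2.1 ni nj = 0 ∧
      get2 arr c.1 c.2 = get2 arr ni nj then
    (st.1 ++ [(ni, nj)], set2 st.2.1 ni nj 1, PySem.Set.add st.2.2.1 (ni, nj), st.2.2.2 + 1)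
  else st

theorem nbr_of_offs (c d : Int × Int)
    (hd : d ∈ [((-1 : Int), (0 : Int)), (1, 0), (0, -1), (0, 1)]) :
    (c.1 + d.1, c.2 + d.2) ∈ [(c.1 - 1, c.2), (c.1 + 1, c.2), (c.1, c.2 - 1), (c.1, c.2 + 1)] := by
  simp only [List.mem_cons, List.not_mem_nil, or_false] at hd
  rcases hd with h | h | h | h <;> subst h <;> dsimp only
  · rw [show ((c.1 + (-1 : Int), c.2 + (0 : Int)) : Int × Int) = (c.1 - 1, c.2) from
      Prod.ext (by omega) (by omega)]
    simp
  · rw [show ((c.1 + (1 : Int), c.2 + (0 : Int)) : Int × Int) = (c.1 + 1, c.2) from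
      Prod.ext (by omega) (by omega)]
    simp
  · rw [show ((c.1 + (0 : Int), c.2 + (-1 : Int)) : Int × Int) = (c.1, c.2 - 1) from
      Prod.ext (by omega) (by omega)]
    simp
  · rw [show ((c.1 + (0 : Int), c.2 + (1 : Int)) : Int × Int) = (c.1, c.2 + 1) from
      Prod.ext (by omega) (by omega)]
    simp

theorem edge_to_offs (c n : Int × Int)
    (hnb : n ∈ [(c.1 - 1, c.2), (c.1 + 1, c.2), (c.1, c.2 - 1), (c.1, c.2 + 1)]) :
    ∃ d ∈ [((-1 : Int), (0 : Int)), (1, 0), (0, -1), (0, 1)], n = (c.1 + d.1, c.2 + d.2) := by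
  simp only [List.mem_cons, List.not_mem_nil, or_false] at hnb
  rcases hnb with h | h | h | h <;> subst h
  · exact ⟨(-1, 0), by simp, Prod.ext (by dsimp only; try omega) (by dsimp only; try omega)⟩
  · exact ⟨(1, 0), by simp, Prod.ext (by dsimp only; try omega) (by dsimp only; try omega)⟩
  · exact ⟨(0, -1), by simp, Prod.ext (by dsimp only; try omega) (by dsimp only; try omega)⟩
  · exact ⟨(0, 1), by simp, Prod.ext (by dsimp only; try omega) (by dsimp only; try omega)⟩

theorem stepFold (arr : List (List Int)) (seen : List (Int × Int)) (c : Int × Int) :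
    ∀ (ds : List (Int × Int)),
      (∀ d ∈ ds, d ∈ [((-1 : Int), (0 : Int)), (1, 0), (0, -1), (0, 1)]) →
      ∀ (q : List (Int × Int)) (V : List (List Int)) (sset : List (Int × Int)) (cnt : Int),
        sset.Nodup → ArrOK V → VRel V (seen ++ sset) →
        ∃ (new : List (Int × Int)),
          ds.foldl (stepA1 arr c) (q, V, sset, cnt) =
            (q ++ new, (ds.foldl (stepA1 arr c) (q, V, sset, cnt)).2.1, sset ++ new,
              cnt + (new.length : Int)) ∧
          (sset ++ new).Nodup ∧ (∀ n ∈ new, EdgeP arr seen c n) ∧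
          ArrOK (ds.foldl (stepA1 arr c) (q, V, sset, cnt)).2.1 ∧
          VRel (ds.foldl (stepA1 arr c) (q, V, sset, cnt)).2.1 (seen ++ (sset ++ new)) ∧
          (∀ d ∈ ds, EdgeP arr seen c (c.1 + d.1, c.2 + d.2) →
            (c.1 + d.1, c.2 + d.2) ∈ sset ++ new) := by
  intro ds
  induction ds with
  | nil =>
    intro hds q V sset cnt hnd hA hV
    exact ⟨[], by simp, by simpa using hnd, by simp, by simpa using hA, by simpa using hV, by simp⟩
  | cons d ds ihds =>
    intro hds q V sset cnt hnd hA hV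
    simp only [List.foldl_cons]
    by_cases hg : 0 ≤ c.1 + d.1 ∧ c.1 + d.1 < 5 ∧ 0 ≤ c.2 + d.2 ∧ c.2 + d.2 < 5 ∧
        get2 V (c.1 + d.1) (c.2 + d.2) = 0 ∧
        get2 arr c.1 c.2 = get2 arr (c.1 + d.1) (c.2 + d.2)
    case pos =>
      have e : stepA1 arr c (q, V, sset, cnt) d =
          (q ++ [(c.1 + d.1, c.2 + d.2)], set2 V (c.1 + d.1) (c.2 + d.2) 1,
            PySem.Set.add sset (c.1 + d.1, c.2 + d.2), cnt + 1) := by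
        unfold stepA1; dsimp only; rw [if_pos hg]
      have hin : inR (c.1 + d.1, c.2 + d.2) := ⟨hg.1, hg.2.1, hg.2.2.1, hg.2.2.2.1⟩
      have hnmem : (c.1 + d.1, c.2 + d.2) ∉ seen ++ sset := by
        intro hmem
        have h1 := (hV _ hin).1.mpr hmem
        rw [hg.2.2.2.2.1] at h1
        exact absurd h1 (by decide)
      have hnseen : (c.1 + d.1, c.2 + d.2) ∉ seen :=
        fun h => hnmem (List.mem_append_left _ h)
      have hnsset : (c.1 + d.1, c.2 + d.2) ∉ sset :=
        fun h => hnmem (List.mem_append_right _ h)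
      have eadd : PySem.Set.add sset (c.1 + d.1, c.2 + d.2) = sset ++ [(c.1 + d.1, c.2 + d.2)] :=
        PySem.Set.add_of_not_mem hnsset
      rw [e, eadd]
      have hnd1 : (sset ++ [(c.1 + d.1, c.2 + d.2)]).Nodup := by
        rw [List.nodup_append]
        refine ⟨hnd, List.nodup_singleton _, ?_⟩
        intro a ha b hb
        rw [List.mem_singleton] at hb
        subst hb
        exact fun hcon => hnsset (hcon ▸ ha)
      have hA1 : ArrOK (set2 V (c.1 + d.1) (c.2 + d.2) 1) :=
        arrOK_set2 V (c.1 + d.1, c.2 + d.2) 1 hA hin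
      have hV1 : VRel (set2 V (c.1 + d.1) (c.2 + d.2) 1)
          (seen ++ (sset ++ [(c.1 + d.1, c.2 + d.2)])) := by
        intro p hp
        have hget := get2_set2 V (c.1 + d.1, c.2 + d.2) p 1 hA hin hp
        by_cases hpe : p = (c.1 + d.1, c.2 + d.2)
        · rw [hpe]
          constructor
          · rw [show ((c.1 + d.1, c.2 + d.2) : Int × Int).1 = c.1 + d.1 from rfl,
              show ((c.1 + d.1, c.2 + d.2) : Int × Int).2 = c.2 + d.2 from rfl]
            rw [hpe] at hget
            rw [hget, if_pos rfl]
            simp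
          · rw [hpe] at hget
            rw [hget, if_pos rfl]
            right; rfl
        · rw [hget, if_neg hpe]
          obtain ⟨hiff, h01⟩ := hV p hp
          refine ⟨?_, h01⟩
          rw [hiff]
          simp only [List.mem_append, List.mem_singleton]
          constructor
          · rintro (h | h)
            · exact Or.inl h
            · exact Or.inr (Or.inl h)
          · rintro (h | h | h)
            · exact Or.inl h
            · exact Or.inr h
            · exact absurd h hpe
      obtain ⟨new, e2, hnd2, hE2, hA2, hV2, hcl2⟩ :=
        ihds (fun d' hd' => hds d' (List.mem_cons_of_mem d hd'))
          (q ++ [(c.1 + d.1, c.2 + d.2)]) (set2 V (c.1 + d.1) (c.2 + d.2) 1)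
          (sset ++ [(c.1 + d.1, c.2 + d.2)]) (cnt + 1) hnd1 hA1 hV1
      refine ⟨(c.1 + d.1, c.2 + d.2) :: new, ?_, ?_, ?_, ?_, ?_, ?_⟩
      · rw [e2]
        refine Prod.ext ?_ (Prod.ext rfl (Prod.ext ?_ ?_)) <;> simp
        ring
      · simpa using hnd2
      · intro n hn
        rcases List.mem_cons.mp hn with hn | hn
        · subst hn
          exact ⟨nbr_of_offs c d (hds d List.mem_cons_self), hin, hnseen, hg.2.2.2.2.2.symm⟩
        · exact hE2 n hn
      · exact hA2
      · have := hV2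
        intro p hp
        have h := this p hp
        simpa using h
      · intro d' hd' hE
        rcases List.mem_cons.mp hd' with hd' | hd'
        · subst hd'; simp
        · have := hcl2 d' hd' hE
          simpa using this
    case neg =>
      have e : stepA1 arr c (q, V, sset, cnt) d = (q, V, sset, cnt) := by
        unfold stepA1; dsimp only; rw [if_neg hg]
      rw [e]
      obtain ⟨new, e2, hnd2, hE2, hA2, hV2, hcl2⟩ :=
        ihds (fun d' hd' => hds d' (List.mem_cons_of_mem d hd')) q V sset cnt hnd hA hV
      refine ⟨new, e2, hnd2, hE2, hA2, hV2, ?_⟩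
      intro d' hd' hE
      rcases List.mem_cons.mp hd' with hd' | hd'
      · subst hd'
        have hin : inR (c.1 + d'.1, c.2 + d'.2) := hE.2.1
        have h1 : get2 V (c.1 + d'.1) (c.2 + d'.2) = 1 := by
          rcases (hV _ hin).2 with h0 | h1
          · exfalso
            exact hg ⟨hin.1, hin.2.1, hin.2.2.1, hin.2.2.2, h0, hE.2.2.2.symm⟩
          · exact h1
        have hmem := (hV _ hin).1.mp h1
        rcases List.mem_append.mp hmem with h | h
        · exact absurd h hE.2.2.1
        · exact List.mem_append_left _ h
      · exact hcl2 d' hd' hE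

-- ---- B side ----
theorem bfsLoop_spec (arr : List (List Int)) (seen : List (Int × Int)) (s : Int × Int)
    (hs : inR s) :
    ∀ (fuel : Nat) (q : List (Int × Int)) (V : List (List Int)) (sset : List (Int × Int))
      (cnt : Int), InvA arr seen s q V sset cnt →
      q.length + (25 - sset.length) < fuel →
      (∀ p, p ∈ (bfsLoop arr fuel q V sset cnt).2.1 ↔ ReachP arr seen s p) ∧
      (bfsLoop arr fuel q V sset cnt).2.1.Nodup ∧
      (bfsLoop arr fuel q V sset cnt).2.2 = ((bfsLoop arr fuel q V sset cnt).2.1.length : Int) ∧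
      ArrOK (bfsLoop arr fuel q V sset cnt).1 ∧
      VRel (bfsLoop arr fuel q V sset cnt).1 (seen ++ (bfsLoop arr fuel q V sset cnt).2.1) := by
  intro fuel
  induction fuel with
  | zero => intro q V sset cnt hInv hf; omega
  | succ n ihf =>
    intro q V sset cnt hInv hf
    obtain ⟨hqs, hnd, hsmem, hRe, hcl, hcnt, hAOK, hVR⟩ := hInv
    match q, hqs, hcl, hf with
    | [], hqs, hcl, hf =>
      simp only [bfsLoop]
      refine ⟨fun p => ⟨hRe p, fun hreach => ?_⟩, hnd, hcnt, hAOK, hVR⟩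
      induction hreach with
      | refl => exact hsmem
      | step hc he ihc => exact hcl _ ihc (List.not_mem_nil) _ he
    | (ci, cj) :: rest, hqs, hcl, hf =>
      have hcmem : (ci, cj) ∈ sset := hqs _ List.mem_cons_self
      have hcin : inR (ci, cj) := reach_inR arr seen s _ hs (hRe _ hcmem)
      simp only [bfsLoop]
      have efold : ∀ st : List (Int × Int) × List (List Int) × PySem.Set (Int × Int) × Int,
          ([((-1 : Int), (0 : Int)), (1, 0), (0, -1), (0, 1)].foldl
            (fun (st : List (Int × Int) × List (List Int) × PySem.Set (Int × Int) × Int) d =>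
              let ni := ci + d.1
              let nj := cj + d.2
              if 0 ≤ ni ∧ ni < 5 ∧ 0 ≤ nj ∧ nj < 5 ∧ get2 st.2.1 ni nj = 0 ∧
                  get2 arr ci cj = get2 arr ni nj then
                (st.1 ++ [(ni, nj)], set2 st.2.1 ni nj 1, PySem.Set.add st.2.2.1 (ni, nj),
                  st.2.2.2 + 1)
              else st) st) =
          ([((-1 : Int), (0 : Int)), (1, 0), (0, -1), (0, 1)].foldl
            (stepA1 arr (ci, cj)) st) := fun _ => rfl
      rw [efold]
      obtain ⟨new, e, hnd2, hEnew, hAOK2, hVR2, hclosed⟩ :=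
        stepFold arr seen (ci, cj)
          [((-1 : Int), (0 : Int)), (1, 0), (0, -1), (0, 1)] (fun d hd => hd)
          rest V sset cnt hnd hAOK hVR
      rw [e]
      have hReNew : ∀ p ∈ sset ++ new, ReachP arr seen s p := by
        intro p hp
        rcases List.mem_append.mp hp with hp | hp
        · exact hRe p hp
        · exact ReachP.step (hRe _ hcmem) (hEnew p hp)
      have hle : (sset ++ new).length ≤ 25 :=
        length_le_25 _ hnd2 (fun p hp => reach_inR arr seen s p hs (hReNew p hp))
      apply ihf
      · refine ⟨?_, hnd2, List.mem_append_left _ hsmem, hReNew, ?_, ?_, hAOK2, hVR2⟩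
        · intro p hp
          rcases List.mem_append.mp hp with hp | hp
          · exact List.mem_append_left _ (hqs p (List.mem_cons_of_mem _ hp))
          · exact List.mem_append_right _ hp
        · intro c' hc' hcq n hE
          rcases List.mem_append.mp hc' with hcs | hcs
          · by_cases hceq : c' = (ci, cj)
            · obtain ⟨d, hd, hnd'⟩ := edge_to_offs c' n hE.1
              subst hceq
              subst hnd'
              exact hclosed d hd hE
            · have : c' ∉ (ci, cj) :: rest := by
                intro hcon
                rcases List.mem_cons.mp hcon with h | h
                · exact hceq h
                · exact hcq (List.mem_append_left _ h)
              exact List.mem_append_left _ (hcl c' hcs this n hE)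
          · exact absurd (List.mem_append_right rest hcs) hcq
        · rw [hcnt]
          simp only [List.length_append]
          push_cast
          ring
      · have h1 : sset.length + new.length ≤ 25 := by simpa using hle
        simp only [List.length_append, List.length_cons] at hf ⊢
        omega

theorem growInner (arr : List (List Int)) (seen : List (Int × Int)) (c : Int × Int) :
    ∀ (ns : List (Int × Int)) (grown : List (Int × Int)), grown.Nodup →
      ∃ new, (ns.foldl
          (fun (grown : PySem.Set (Int × Int)) n =>
            if 0 ≤ n.1 ∧ n.1 < 5 ∧ 0 ≤ n.2 ∧ n.2 < 5 ∧ ¬ PySem.Set.contains seen n = true ∧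
                get2 arr n.1 n.2 = get2 arr c.1 c.2 then
              PySem.Set.add grown n
            else grown) grown) = grown ++ new ∧
        (grown ++ new).Nodup ∧
        (∀ x ∈ new, x ∈ ns ∧ inR x ∧ x ∉ seen ∧ get2 arr x.1 x.2 = get2 arr c.1 c.2) ∧
        (∀ x ∈ ns, inR x → x ∉ seen → get2 arr x.1 x.2 = get2 arr c.1 c.2 →
          x ∈ grown ++ new) := by
  intro ns
  induction ns with
  | nil =>
    intro grown hnd
    exact ⟨[], by simp, by simpa using hnd, by simp, by simp⟩
  | cons x ns ih =>
    intro grown hnd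
    simp only [List.foldl_cons]
    by_cases hg : 0 ≤ x.1 ∧ x.1 < 5 ∧ 0 ≤ x.2 ∧ x.2 < 5 ∧
        ¬ PySem.Set.contains seen x = true ∧ get2 arr x.1 x.2 = get2 arr c.1 c.2
    · rw [if_pos hg]
      by_cases hmem : x ∈ grown
      · rw [PySem.Set.add_of_mem hmem]
        obtain ⟨new, h1, h2, h3, h4⟩ := ih grown hnd
        refine ⟨new, h1, h2, fun y hy => ?_, fun y hy => ?_⟩
        · obtain ⟨hy1, hy2⟩ := h3 y hy
          exact ⟨List.mem_cons_of_mem x hy1, hy2⟩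
        · rcases List.mem_cons.mp hy with hy | hy
          · subst hy; intro _ _ _; exact List.mem_append_left _ hmem
          · exact h4 y hy
      · rw [PySem.Set.add_of_not_mem hmem]
        have hnd2 : (grown ++ [x]).Nodup := by
          rw [List.nodup_append]
          refine ⟨hnd, List.nodup_singleton x, ?_⟩
          intro a ha b hb
          rw [List.mem_singleton] at hb
          subst hb
          exact fun hcon => hmem (hcon ▸ ha)
        obtain ⟨new, h1, h2, h3, h4⟩ := ih (grown ++ [x]) hnd2
        have hxns : x ∉ seen := fun hc => hg.2.2.2.2.1 (by simpa using hc)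
        refine ⟨x :: new, by rw [h1]; simp, by simpa using h2, fun y hy => ?_, fun y hy => ?_⟩
        · rcases List.mem_cons.mp hy with hy | hy
          · subst hy
            exact ⟨List.mem_cons_self, ⟨hg.1, hg.2.1, hg.2.2.1, hg.2.2.2.1⟩, hxns, hg.2.2.2.2.2⟩
          · obtain ⟨hy1, hy2⟩ := h3 y hy
            exact ⟨List.mem_cons_of_mem x hy1, hy2⟩
        · rcases List.mem_cons.mp hy with hy | hy
          · subst hy; intro _ _ _; simp
          · intro a b c'
            have := h4 y hy a b c'
            simpa using this
    · rw [if_neg hg]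
      obtain ⟨new, h1, h2, h3, h4⟩ := ih grown hnd
      refine ⟨new, h1, h2, fun y hy => ?_, fun y hy => ?_⟩
      · obtain ⟨hy1, hy2⟩ := h3 y hy
        exact ⟨List.mem_cons_of_mem x hy1, hy2⟩
      · rcases List.mem_cons.mp hy with hy | hy
        · subst hy
          intro ha hb hc
          exact absurd ⟨ha.1, ha.2.1, ha.2.2.1, ha.2.2.2,
            fun hcon => hb (by simpa using hcon), hc⟩ hg
        · exact h4 y hy

theorem growSpec (arr : List (List Int)) (seen : List (Int × Int))
    (comp : List (Int × Int)) (hnd : comp.Nodup) :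
    ∃ new, altGrow arr seen comp = comp ++ new ∧ (comp ++ new).Nodup ∧
      (∀ n ∈ new, ∃ c ∈ comp, EdgeP arr seen c n) ∧
      (∀ c ∈ comp, ∀ n, EdgeP arr seen c n → n ∈ comp ++ new) := by
  have grOut : ∀ (cs : List (Int × Int)) (acc : List (Int × Int)), acc.Nodup →
      ∃ new, (cs.foldl (fun (grown : PySem.Set (Int × Int)) c =>
          [(c.1 - 1, c.2), (c.1 + 1, c.2), (c.1, c.2 - 1), (c.1, c.2 + 1)].foldl
            (fun (grown : PySem.Set (Int × Int)) n =>
              if 0 ≤ n.1 ∧ n.1 < 5 ∧ 0 ≤ n.2 ∧ n.2 < 5 ∧ ¬ PySem.Set.contains seen n = true ∧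
                  get2 arr n.1 n.2 = get2 arr c.1 c.2 then
                PySem.Set.add grown n
              else grown) grown) acc) = acc ++ new ∧ (acc ++ new).Nodup ∧
        (∀ n ∈ new, ∃ c ∈ cs, EdgeP arr seen c n) ∧
        (∀ c ∈ cs, ∀ n, EdgeP arr seen c n → n ∈ acc ++ new) := by
    intro cs
    induction cs with
    | nil =>
      intro acc hnd
      exact ⟨[], by simp, by simpa using hnd, by simp, by simp⟩
    | cons c cs ih =>
      intro acc hnd
      rw [List.foldl_cons]
      obtain ⟨new1, h1, h2, h3, h4⟩ := growInner arr seen c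
        [(c.1 - 1, c.2), (c.1 + 1, c.2), (c.1, c.2 - 1), (c.1, c.2 + 1)] acc hnd
      rw [h1]
      obtain ⟨new2, g1, g2, g3, g4⟩ := ih (acc ++ new1) h2
      refine ⟨new1 ++ new2, by rw [g1]; simp, by simpa using g2, fun n hn => ?_, fun c' hc' n hn => ?_⟩
      · rcases List.mem_append.mp hn with hn | hn
        · obtain ⟨ha, hb, hc, hd⟩ := h3 n hn
          exact ⟨c, List.mem_cons_self, ha, hb, hc, hd⟩
        · obtain ⟨c', hc', he⟩ := g3 n hn
          exact ⟨c', List.mem_cons_of_mem c hc', he⟩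
      · rcases List.mem_cons.mp hc' with hc' | hc'
        · subst hc'
          obtain ⟨ha, hb, hc, hd⟩ := hn
          have := h4 n ha hb hc hd
          rw [← List.append_assoc]
          exact List.mem_append_left _ this
        · have := g4 c' hc' n hn
          simpa using this
  unfold altGrow
  rw [PySem.Set.ofList_eq_self_of_nodup comp hnd]
  exact grOut comp comp hnd

theorem altLoop_spec (arr : List (List Int)) (seen : List (Int × Int)) (s : Int × Int)
    (hs : inR s) :
    ∀ (fuel : Nat) (comp : List (Int × Int)), comp.Nodup → s ∈ comp →
      (∀ p ∈ comp, ReachP arr seen s p) →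
      25 < comp.length + fuel →
      (altLoop arr seen fuel comp).Nodup ∧
      (∀ p, p ∈ altLoop arr seen fuel comp ↔ ReachP arr seen s p) := by
  intro fuel
  induction fuel with
  | zero =>
    intro comp hnd hmem hR hf
    have hle : comp.length ≤ 25 :=
      length_le_25 comp hnd (fun p hp => reach_inR arr seen s p hs (hR p hp))
    omega
  | succ n ih =>
    intro comp hnd hmem hR hf
    obtain ⟨new, h1, h2, h3, h4⟩ := growSpec arr seen comp hnd
    simp only [altLoop, h1]
    by_cases hnew : new = []
    · subst hnew
      rw [if_pos (by simp)]
      simp only [List.append_nil] at h4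
      refine ⟨hnd, fun p => ⟨hR p, fun hreach => ?_⟩⟩
      induction hreach with
      | refl => exact hmem
      | step hc he ihc => exact h4 _ ihc _ he
    · rw [if_neg (by
        show ¬ ((comp ++ new).length : Int) = (comp.length : Int)
        have : new.length ≠ 0 := fun hc => hnew (List.length_eq_zero_iff.mp hc)
        simp only [List.length_append]
        intro hcon
        have := Int.ofNat.inj hcon
        omega)]
      exact ih (comp ++ new) h2 (List.mem_append_left _ hmem)
        (fun p hp => by
          rcases List.mem_append.mp hp with hp | hp
          · exact hR p hp
          · obtain ⟨c, hc, he⟩ := h3 p hp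
            exact ReachP.step (hR c hc) he)
        (by
          have : new.length ≠ 0 := fun hc => hnew (List.length_eq_zero_iff.mp hc)
          simp only [List.length_append]
          omega)

-- ---- coupling of the outer scans ----
def StRel (stA : List (List Int) × List (List Int) × Int)
    (stB : List (List Int) × PySem.Set (Int × Int) × Int) : Prop :=
  stA.1 = stB.1 ∧ ArrOK stA.1 ∧ ArrOK stA.2.1 ∧ stB.2.1.Nodup ∧
  (∀ p ∈ stB.2.1, inR p) ∧ VRel stA.2.1 stB.2.1 ∧ stA.2.2 = stB.2.2

theorem fold_couple {α β γ : Type} (fA : α → γ → α) (fB : β → γ → β) (R : α → β → Prop)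
    (l : List γ) (h : ∀ x ∈ l, ∀ a b, R a b → R (fA a x) (fB b x)) :
    ∀ a b, R a b → R (l.foldl fA a) (l.foldl fB b) := by
  induction l with
  | nil => intro a b hR; exact hR
  | cons x l ih =>
    intro a b hR
    simp only [List.foldl_cons]
    exact ih (fun y hy => h y (List.mem_cons_of_mem x hy)) _ _ (h x List.mem_cons_self a b hR)

theorem VRel_congr (V : List (List Int)) (m1 m2 : List (Int × Int)) (hV : VRel V m1)
    (hm : ∀ p, p ∈ m1 ↔ p ∈ m2) : VRel V m2 := by
  intro p hp
  obtain ⟨hiff, h01⟩ := hV p hp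
  exact ⟨hiff.trans (hm p), h01⟩

theorem inner_step (clr : Int) (i j : Int) (hi : 0 ≤ i ∧ i < 5) (hj : 0 ≤ j ∧ j < 5)
    (stA : List (List Int) × List (List Int) × Int)
    (stB : List (List Int) × PySem.Set (Int × Int) × Int) (hR : StRel stA stB) :
    StRel (let r := bfs stA.1 stA.2.1 i j clr; (r.1, r.2.1, stA.2.2 + r.2.2))
      (let comp := altLoop stB.1 stB.2.1 25 (PySem.Set.ofList [(i, j)])
       let seen' := PySem.Set.union stB.2.1 comp
       if 3 ≤ PySem.Set.len comp then
         if clr = 1 then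
           (comp.foldl (fun a (p : Int × Int) => set2 a p.1 p.2 0) stB.1, seen',
             stB.2.2 + PySem.Set.len comp)
         else (stB.1, seen', stB.2.2 + PySem.Set.len comp)
       else (stB.1, seen', stB.2.2)) := by
  obtain ⟨hab, hAOKa, hAOKV, hndseen, hseenin, hVRel, hcnt⟩ := hR
  have hsinR : inR (i, j) := ⟨hi.1, hi.2, hj.1, hj.2⟩
  -- initial invariant for A's BFS
  have hInv0 : InvA stA.1 stB.2.1 (i, j) [(i, j)] (set2 stA.2.1 i j 1) [(i, j)] 1 := by
    refine ⟨fun p hp => hp, List.nodup_singleton _, List.mem_singleton_self _, ?_, ?_, by simp, ?_, ?_⟩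
    · intro p hp
      rw [List.mem_singleton] at hp
      subst hp
      exact ReachP.refl
    · intro c hcs hcq n hE
      exact absurd hcs hcq
    · exact arrOK_set2 stA.2.1 (i, j) 1 hAOKV hsinR
    · intro p hp
      have hg := get2_set2 stA.2.1 (i, j) p 1 hAOKV hsinR hp
      by_cases hpe : p = (i, j)
      · subst hpe
        rw [hg, if_pos rfl]
        exact ⟨by simp, Or.inr rfl⟩
      · rw [hg, if_neg hpe]
        obtain ⟨hiff, h01⟩ := hVRel p hp
        refine ⟨?_, h01⟩
        rw [hiff]
        simp only [List.mem_append, List.mem_singleton]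
        constructor
        · exact fun h => Or.inl h
        · rintro (h | h)
          · exact h
          · exact absurd h hpe
  have hbfs := bfsLoop_spec stA.1 stB.2.1 (i, j) hsinR 26 [(i, j)]
    (set2 stA.2.1 i j 1) [(i, j)] 1 hInv0 (by norm_num)
  have hBalt := altLoop_spec stA.1 stB.2.1 (i, j) hsinR 25 [(i, j)]
    (List.nodup_singleton _) (List.mem_singleton_self _)
    (fun p hp => by rw [List.mem_singleton] at hp; subst hp; exact ReachP.refl)
    (by norm_num)
  obtain ⟨hAchar, hAnd, hAcnt, hAOK2, hVR2⟩ := hbfs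
  obtain ⟨hBnd, hBchar⟩ := hBalt
  have hperm : (bfsLoop stA.1 26 [(i, j)] (set2 stA.2.1 i j 1) [(i, j)] 1).2.1.Perm
      (altLoop stA.1 stB.2.1 25 [(i, j)]) := by
    rw [List.perm_ext_iff_of_nodup hAnd hBnd]
    exact fun p => (hAchar p).trans (hBchar p).symm
  have hlen := hperm.length_eq
  have hreachin : ∀ p ∈ (bfsLoop stA.1 26 [(i, j)] (set2 stA.2.1 i j 1) [(i, j)] 1).2.1,
      inR p := fun p hp => reach_inR _ _ _ p hsinR ((hAchar p).mp hp)
  have hcompin : ∀ p ∈ altLoop stA.1 stB.2.1 25 [(i, j)], inR p :=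
    fun p hp => reach_inR _ _ _ p hsinR ((hBchar p).mp hp)
  have hVR3 : VRel (bfsLoop stA.1 26 [(i, j)] (set2 stA.2.1 i j 1) [(i, j)] 1).1
      (PySem.Set.union stB.2.1 (altLoop stA.1 stB.2.1 25 [(i, j)])) := by
    refine VRel_congr _ _ _ hVR2 ?_
    intro p
    rw [PySem.Set.mem_union, List.mem_append]
    constructor
    · rintro (h | h)
      · exact Or.inl h
      · exact Or.inr ((hBchar p).mpr ((hAchar p).mp h))
    · rintro (h | h)
      · exact Or.inl h
      · exact Or.inr ((hAchar p).mpr ((hBchar p).mp h))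
  have hndU : (PySem.Set.union stB.2.1 (altLoop stA.1 stB.2.1 25 [(i, j)])).Nodup :=
    PySem.Set.nodup_union _ _ hndseen
  have hinU : ∀ p ∈ PySem.Set.union stB.2.1 (altLoop stA.1 stB.2.1 25 [(i, j)]), inR p := by
    intro p hp
    rw [PySem.Set.mem_union] at hp
    rcases hp with h | h
    · exact hseenin p h
    · exact hcompin p h
  -- reduce the two let-blocks
  show StRel
    ((bfs stA.1 stA.2.1 i j clr).1, (bfs stA.1 stA.2.1 i j clr).2.1,
      stA.2.2 + (bfs stA.1 stA.2.1 i j clr).2.2)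
    (let comp := altLoop stB.1 stB.2.1 25 (PySem.Set.ofList [(i, j)])
     let seen' := PySem.Set.union stB.2.1 comp
     if 3 ≤ PySem.Set.len comp then
       if clr = 1 then
         (comp.foldl (fun a (p : Int × Int) => set2 a p.1 p.2 0) stB.1, seen',
           stB.2.2 + PySem.Set.len comp)
       else (stB.1, seen', stB.2.2 + PySem.Set.len comp)
     else (stB.1, seen', stB.2.2))
  rw [show PySem.Set.ofList [(i, j)] = [(i, j)] from
    PySem.Set.ofList_eq_self_of_nodup _ (List.nodup_singleton _), ← hab]
  unfold bfs
  rw [show PySem.Set.add PySem.Set.empty (i, j) = [(i, j)] from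
    PySem.Set.add_of_not_mem (List.not_mem_nil)]
  dsimp only
  have hc22 : (bfsLoop stA.1 26 [(i, j)] (set2 stA.2.1 i j 1) [(i, j)] 1).2.2 =
      PySem.Set.len (altLoop stA.1 stB.2.1 25 [(i, j)]) := by
    rw [hAcnt]
    show _ = ((altLoop stA.1 stB.2.1 25 [(i, j)]).length : Int)
    rw [hlen]
  rw [hc22]
  by_cases h3 : 3 ≤ PySem.Set.len (altLoop stA.1 stB.2.1 25 [(i, j)])
  · rw [if_pos h3, if_pos h3]
    by_cases hclr : clr = 1
    · rw [if_pos hclr, if_pos hclr]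
      have harr : (bfsLoop stA.1 26 [(i, j)] (set2 stA.2.1 i j 1) [(i, j)] 1).2.1.foldl
          (fun a (p : Int × Int) => set2 a p.1 p.2 0) stA.1 =
          (altLoop stA.1 stB.2.1 25 [(i, j)]).foldl
            (fun a (p : Int × Int) => set2 a p.1 p.2 0) stA.1 :=
        clearF_perm _ _ hperm hreachin stA.1
      exact ⟨harr, by
          dsimp only
          exact arrOK_clearF _ hreachin stA.1 hAOKa,
        hAOK2, hndU, hinU, hVR3, by dsimp only; rw [hcnt]⟩
    · rw [if_neg hclr, if_neg hclr]
      exact ⟨rfl, hAOKa, hAOK2, hndU, hinU, hVR3, by dsimp only; rw [hcnt]⟩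
  · rw [if_neg h3, if_neg h3]
    exact ⟨rfl, hAOKa, hAOK2, hndU, hinU, hVR3, by dsimp only; rw [hcnt]; ring⟩


-- ===== VERDICT =====
theorem count_clear_spec : Claim_equal_count_clear := by
  intro arr clr hDom hPre
  unfold Spec_count_clear
  show count_clear arr clr = count_clear_alt arr clr
  unfold count_clear count_clear_alt
  dsimp only
  have hAOK0 : ArrOK arr := hPre
  have hAOKV0 : ArrOK ((List.range 5).map (fun _ => List.replicate 5 (0 : Int))) := by
    constructor
    · simp
    · intro r hr
      have hr' := List.mem_of_mem_take hr
      rw [List.mem_map] at hr'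
      obtain ⟨k, _, hk⟩ := hr'
      rw [← hk]
      simp
  have hV0 : VRel ((List.range 5).map (fun _ => List.replicate 5 (0 : Int))) [] := by
    intro p hp
    have hg : get2 ((List.range 5).map (fun _ => List.replicate 5 (0 : Int))) p.1 p.2 = 0 := by
      rw [get2_eq _ p hp]
      have hlt : p.1.toNat < ((List.range 5).map (fun _ => List.replicate 5 (0 : Int))).length := by
        obtain ⟨h1, h2, h3, h4⟩ := hp
        simp only [List.length_map, List.length_range]
        omega
      rw [List.getD_eq_getElem _ [] hlt]
      rw [List.getElem_map]
      obtain ⟨h1, h2, h3, h4⟩ := hp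
      have h5 : p.2.toNat = 0 ∨ p.2.toNat = 1 ∨ p.2.toNat = 2 ∨ p.2.toNat = 3 ∨ p.2.toNat = 4 := by
        omega
      rcases h5 with h | h | h | h | h <;> simp [h]
    rw [hg]
    exact ⟨by simp, Or.inl rfl⟩
  have hR0 : StRel (arr, (List.range 5).map (fun _ => List.replicate 5 (0 : Int)), (0 : Int))
      (arr, PySem.Set.empty, (0 : Int)) :=
    ⟨rfl, hAOK0, hAOKV0, List.nodup_nil, fun p hp => absurd hp List.not_mem_nil, hV0, rfl⟩
  refine (fold_couple _ _ StRel (PySem.List.pyRange 0 5 1) ?_ _ _ hR0).2.2.2.2.2.2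
  intro i hi a b hR
  refine fold_couple _ _ StRel (PySem.List.pyRange 0 5 1) ?_ a b hR
  intro j hj a' b' hR'
  exact inner_step clr i j
    (by rw [PySem.List.mem_pyRange_one] at hi; exact hi)
    (by rw [PySem.List.mem_pyRange_one] at hj; exact hj) a' b' hR'
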